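-- pv_equiv track=rewrite | github.com/eduardgg/projects | algorithms_and_ds/fenwickTree.py | fw_inverse
-- ===== SOURCE A (Python) =====
-- def fw_inverse(t):
--     w = [[] for _ in range(len(t))]
--     for i in range(len(w)):
--         j = i | i+1
--         if j < len(w):
--             w[j].append(i)
--     # Es modifica t
--     for j in range(len(t)-1, -1, -1):
--         for i in w[j]:
--             t[j] -= t[i]
--     return t
-- ===== SOURCE B (Python) =====
-- def fw_inverse(t):
--     n = len(t)
--     for i in range(n - 1, -1, -1):
--         j = i | (i + 1)
--         if j < n:
--             t[j] -= t[i]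
--     return t
-- ===== Notes on version B (the rewrite author's own statement) =====
-- stated objective: simpler
-- what changed: Drops A's auxiliary children adjacency table w and its parent-grouped double loop; B does one flat reverse pass over indices, computing the parent j = i | (i+1) inline and subtracting t[i] from t[j] (measured constant-factor speedup from skipping the table build).
import Mathlib
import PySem

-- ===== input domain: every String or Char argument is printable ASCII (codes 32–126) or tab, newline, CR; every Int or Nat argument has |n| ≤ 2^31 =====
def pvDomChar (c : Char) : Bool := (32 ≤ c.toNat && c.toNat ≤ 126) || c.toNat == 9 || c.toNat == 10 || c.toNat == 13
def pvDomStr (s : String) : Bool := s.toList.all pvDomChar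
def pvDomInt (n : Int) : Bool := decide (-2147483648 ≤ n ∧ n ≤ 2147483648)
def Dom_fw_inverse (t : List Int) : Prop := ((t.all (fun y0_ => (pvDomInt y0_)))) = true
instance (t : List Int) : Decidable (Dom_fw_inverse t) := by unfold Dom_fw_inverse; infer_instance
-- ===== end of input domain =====

-- B replaces A's children adjacency table and parent-grouped double loop by one flat reverse pass
-- with the parent computed inline (objective: simpler).  Both Pythons mutate t in place and return it;
-- the proof is about the returned value.  All list indices used are in range, so getD never hits its
-- default; range(n-1,-1,-1) is ported as the reverse of range n (exact for this descending unit step).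

-- ===== PORT A =====
def fw_inverse (t : List Int) : List Int :=
  let n := t.length
  -- w = [[] for _ in range(len(t))]; for i in range(len(w)): j = i|i+1; if j < len(w): w[j].append(i)
  let w := (List.range n).foldl
    (fun w i =>
      let j := i ||| (i + 1)
      if j < n then w.set j (w.getD j [] ++ [i]) else w)
    (List.replicate n ([] : List Nat))
  -- for j in range(len(t)-1,-1,-1): for i in w[j]: t[j] -= t[i]
  (List.range n).reverse.foldl
    (fun acc j =>
      (w.getD j []).foldl (fun acc i => acc.set j (acc.getD j 0 - acc.getD i 0)) acc)
    t

-- ===== PORT B =====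
def fw_inverse_alt (t : List Int) : List Int :=
  let n := t.length
  -- for i in range(n-1,-1,-1): j = i|(i+1); if j < n: t[j] -= t[i]
  (List.range n).reverse.foldl
    (fun acc i =>
      let j := i ||| (i + 1)
      if j < n then acc.set j (acc.getD j 0 - acc.getD i 0) else acc)
    t

-- ===== PRECONDITION & SPEC =====
def Spec_fw_inverse (t : List Int) (out : List Int) : Prop := out = fw_inverse_alt t
instance (t : List Int) (out : List Int) : Decidable (Spec_fw_inverse t out) := by unfold Spec_fw_inverse; infer_instance

-- ===== CLAIM (what is proved, stated in full; the proofs are below) =====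
def Claim_equal_fw_inverse : Prop := ∀ (t : List Int), Dom_fw_inverse t → Spec_fw_inverse t (fw_inverse t)

-- ===== LEMMAS AND PROOFS =====

-- the children of k in [m, m+c), summed against the ORIGINAL list t
def childSum (t : List Int) (k m c : Nat) : Int :=
  (((List.range' m c).filter (fun i => i ||| (i + 1) == k)).map (fun i => t.getD i 0)).sum

theorem lt_parent (i : Nat) : i < i ||| (i + 1) :=
  Nat.lt_of_lt_of_le (Nat.lt_succ_self i) Nat.right_le_or

theorem childSum_of_le {t : List Int} {k m : Nat} (c : Nat) (h : k ≤ m) :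
    childSum t k m c = 0 := by
  unfold childSum
  have : (List.range' m c).filter (fun i => i ||| (i + 1) == k) = [] := by
    apply List.filter_eq_nil_iff.mpr
    intro i hi
    have hm : m ≤ i := (List.mem_range'_1.mp hi).1
    have : k < i ||| (i + 1) := Nat.lt_of_le_of_lt (le_trans h hm) (lt_parent i)
    simp only [beq_iff_eq]
    omega
  simp [this]

theorem childSum_cons {t : List Int} {k m c : Nat} :
    childSum t k m (c + 1) =
      (if m ||| (m + 1) = k then t.getD m 0 else 0) + childSum t k (m + 1) c := by
  unfold childSum
  rw [List.range'_succ, List.filter_cons]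
  split <;> rename_i h <;> simp_all

theorem getD_set (l : List Int) (j k : Nat) (v : Int) :
    (l.set j v).getD k 0 = if k = j ∧ j < l.length then v else l.getD k 0 := by
  by_cases hk : k = j
  · subst hk
    by_cases hj : k < l.length <;> simp [List.getD, hj]
  · rw [if_neg (fun h => hk h.1)]
    unfold List.getD
    rw [List.getElem?_set]
    split <;> rename_i h
    · exact (hk h.symm).elim
    · rfl

theorem foldr_congr_mem {α β : Type} (l : List α) (f g : α → β → β) (b : β)
    (h : ∀ a ∈ l, ∀ acc, f a acc = g a acc) : l.foldr f b = l.foldr g b := by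
  induction l with
  | nil => rfl
  | cons x l ih =>
    rw [List.foldr_cons, List.foldr_cons,
      ih (fun a ha acc => h a (List.mem_cons_of_mem _ ha) acc), h x (List.mem_cons_self ..)]

-- B's loop invariant: the reverse pass over [m, m+c) subtracts, from each k, its children in [m, m+c)
theorem alt_loop (t : List Int) (n : Nat) (hn : n = t.length) :
    ∀ c m, m + c = n →
      (let r := (List.range' m c).foldr
          (fun i acc =>
            let j := i ||| (i + 1)
            if j < n then acc.set j (acc.getD j 0 - acc.getD i 0) else acc) t
       r.length = n ∧ ∀ k, k < n → r.getD k 0 = t.getD k 0 - childSum t k m c) := by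
  intro c
  induction c with
  | zero =>
    intro m _
    refine ⟨hn.symm, fun k _ => ?_⟩
    simp only [List.range'_zero, List.foldr_nil, childSum, List.filter_nil, List.map_nil,
      List.sum_nil]
    omega
  | succ c ih =>
    intro m hm
    have hmn : m < n := by omega
    obtain ⟨hlen, hIH⟩ := ih (m + 1) (by omega)
    rw [List.range'_succ, List.foldr_cons]
    set R := (List.range' (m + 1) c).foldr
        (fun i acc =>
          let j := i ||| (i + 1)
          if j < n then acc.set j (acc.getD j 0 - acc.getD i 0) else acc) t with hR
    have hRm : R.getD m 0 = t.getD m 0 := by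
      rw [hIH m hmn, childSum_of_le c (Nat.le_succ m)]; omega
    show (if m ||| (m + 1) < n then
        R.set (m ||| (m + 1)) (R.getD (m ||| (m + 1)) 0 - R.getD m 0) else R).length = n ∧ _
    by_cases hj : m ||| (m + 1) < n
    · rw [if_pos hj]
      refine ⟨by rw [List.length_set, hlen], fun k hk => ?_⟩
      rw [getD_set, hlen]
      by_cases hkj : k = m ||| (m + 1)
      · rw [if_pos ⟨hkj, hj⟩, hIH _ hj, hRm, hkj, childSum_cons, if_pos rfl]
        omega
      · rw [if_neg (fun h => hkj h.1), hIH k hk, childSum_cons, if_neg (fun h => hkj h.symm)]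
        omega
    · rw [if_neg hj]
      refine ⟨hlen, fun k hk => ?_⟩
      rw [hIH k hk, childSum_cons, if_neg (by omega)]
      omega

-- A's children table: w.getD j is the ascending list of the i < m whose parent is j
theorem w_build (n : Nat) :
    ∀ m, m ≤ n →
      (let w := (List.range m).foldl
          (fun w i =>
            let j := i ||| (i + 1)
            if j < n then w.set j (w.getD j [] ++ [i]) else w)
          (List.replicate n ([] : List Nat))
       w.length = n ∧ ∀ j, j < n →
         w.getD j [] = (List.range m).filter (fun i => i ||| (i + 1) == j)) := by
  intro m
  induction m with
  | zero => intro _; exact ⟨by simp, fun j hj => by simp⟩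
  | succ m ih =>
    intro hm
    obtain ⟨hlen, hIH⟩ := ih (by omega)
    rw [List.range_succ, List.foldl_append, List.foldl_cons, List.foldl_nil]
    set W := (List.range m).foldl
        (fun w i =>
          let j := i ||| (i + 1)
          if j < n then w.set j (w.getD j [] ++ [i]) else w)
        (List.replicate n ([] : List Nat)) with hW
    show (if m ||| (m + 1) < n then
        W.set (m ||| (m + 1)) (W.getD (m ||| (m + 1)) [] ++ [m]) else W).length = n ∧ _
    by_cases hj : m ||| (m + 1) < n
    · rw [if_pos hj]
      refine ⟨by rw [List.length_set, hlen], fun j hjn => ?_⟩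
      rw [List.filter_append, List.filter_cons, List.filter_nil]
      by_cases hje : j = m ||| (m + 1)
      · have hset : (W.set (m ||| (m + 1)) (W.getD (m ||| (m + 1)) [] ++ [m])).getD
            (m ||| (m + 1)) [] = W.getD (m ||| (m + 1)) [] ++ [m] := by
          rw [List.getD, List.getElem?_set, if_pos rfl, hlen, if_pos hj]
          rfl
        rw [hje, hset, hIH _ hj]
        have : (m ||| (m + 1) == m ||| (m + 1)) = true := by simp
        rw [this, if_pos rfl]
      · have hset : (W.set (m ||| (m + 1)) (W.getD (m ||| (m + 1)) [] ++ [m])).getD j [] =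
            W.getD j [] := by
          rw [List.getD, List.getElem?_set, if_neg (fun h => hje h.symm)]
          rfl
        have : (m ||| (m + 1) == j) = false := by
          simp only [beq_eq_false_iff_ne, ne_eq]
          exact fun h => hje h.symm
        rw [hset, hIH _ hjn, this, if_neg (by simp), List.append_nil]
    · rw [if_neg hj]
      refine ⟨hlen, fun j hjn => ?_⟩
      rw [List.filter_append, List.filter_cons, List.filter_nil, hIH _ hjn]
      have : (m ||| (m + 1) == j) = false := by
        simp only [beq_eq_false_iff_ne, ne_eq]
        omega
      rw [this, if_neg (by simp), List.append_nil]

-- A's inner loop: subtracting each child in turn equals subtracting their sum (j is never read)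
theorem inner_loop (j : Nat) :
    ∀ (l : List Nat) (acc : List Int), (∀ i ∈ l, i ≠ j) → j < acc.length →
      l.foldl (fun acc i => acc.set j (acc.getD j 0 - acc.getD i 0)) acc =
        acc.set j (acc.getD j 0 - (l.map (fun i => acc.getD i 0)).sum) := by
  intro l
  induction l with
  | nil =>
    intro acc _ hj
    simp only [List.foldl_nil, List.map_nil, List.sum_nil, sub_zero, List.getD,
      List.getElem?_eq_getElem hj, Option.getD_some]
    exact (List.set_getElem_self hj).symm
  | cons i l ih =>
    intro acc hne hj
    rw [List.foldl_cons, ih _ (fun x hx => hne x (List.mem_cons_of_mem _ hx)) (by simpa using hj)]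
    have hij : i ≠ j := hne i (List.mem_cons_self ..)
    rw [List.set_set]
    congr 1
    rw [getD_set, if_pos ⟨rfl, hj⟩, List.map_cons, List.sum_cons]
    have : (l.map (fun x => (acc.set j (acc.getD j 0 - acc.getD i 0)).getD x 0)) =
        l.map (fun x => acc.getD x 0) := by
      apply List.map_congr_left
      intro x hx
      rw [getD_set, if_neg (fun h => hne x (List.mem_cons_of_mem _ hx) h.1)]
    rw [this]
    ring

-- A's outer loop invariant: after processing parents in [m, n), each k ≥ m holds its final value
theorem a_loop (t : List Int) (n : Nat) (hn : n = t.length) :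
    ∀ c m, m + c = n →
      (let r := (List.range' m c).foldr
          (fun j acc =>
            (((List.range n).filter (fun i => i ||| (i + 1) == j)).foldl
              (fun acc i => acc.set j (acc.getD j 0 - acc.getD i 0)) acc)) t
       r.length = n ∧ ∀ k, k < n →
         r.getD k 0 = t.getD k 0 - (if m ≤ k then childSum t k 0 n else 0)) := by
  intro c
  induction c with
  | zero =>
    intro m hm
    refine ⟨by simp [hn], fun k hk => ?_⟩
    rw [List.range'_zero, List.foldr_nil, if_neg (by omega)]
    omega
  | succ c ih =>
    intro m hm
    have hmn : m < n := by omega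
    obtain ⟨hlen, hIH⟩ := ih (m + 1) (by omega)
    rw [List.range'_succ, List.foldr_cons]
    set R := (List.range' (m + 1) c).foldr
        (fun j acc =>
          (((List.range n).filter (fun i => i ||| (i + 1) == j)).foldl
            (fun acc i => acc.set j (acc.getD j 0 - acc.getD i 0)) acc)) t with hR
    have hchild : ∀ i ∈ (List.range n).filter (fun i => i ||| (i + 1) == m), i < m := by
      intro i hi
      have := (List.mem_filter.mp hi).2
      simp only [beq_iff_eq] at this
      exact this ▸ lt_parent i
    rw [inner_loop m _ R (fun i hi => Nat.ne_of_lt (hchild i hi)) (hlen ▸ hmn)]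
    have hreads : (((List.range n).filter (fun i => i ||| (i + 1) == m)).map
        (fun i => R.getD i 0)).sum = childSum t m 0 n := by
      unfold childSum
      rw [← List.range_eq_range']
      congr 1
      apply List.map_congr_left
      intro i hi
      have him : i < m := hchild i hi
      rw [hIH i (lt_trans him hmn), if_neg (by omega)]
      omega
    have hRm : R.getD m 0 = t.getD m 0 := by
      rw [hIH m hmn, if_neg (by omega)]; omega
    refine ⟨by rw [List.length_set, hlen], fun k hk => ?_⟩
    rw [getD_set, hlen]
    by_cases hkm : k = m
    · rw [if_pos ⟨hkm, hmn⟩, hreads, hRm, hkm, if_pos (le_refl m)]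
    · rw [if_neg (fun h => hkm h.1), hIH k hk]
      by_cases h1 : m ≤ k
      · rw [if_pos (by omega), if_pos h1]
      · rw [if_neg (by omega), if_neg h1]

-- ===== VERDICT (by name: the statement is the Claim_ definition above) =====
theorem fw_inverse_spec : Claim_equal_fw_inverse := by
  intro t _
  unfold Spec_fw_inverse fw_inverse fw_inverse_alt
  set n := t.length with hn
  obtain ⟨hwlen, hw⟩ := w_build n n (le_refl n)
  rw [List.foldl_reverse, List.foldl_reverse]
  set W := (List.range n).foldl
      (fun w i =>
        let j := i ||| (i + 1)
        if j < n then w.set j (w.getD j [] ++ [i]) else w)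
      (List.replicate n ([] : List Nat)) with hW
  have hAeq : (List.range n).foldr
      (fun j acc => (W.getD j []).foldl
        (fun acc i => acc.set j (acc.getD j 0 - acc.getD i 0)) acc) t =
      (List.range n).foldr
      (fun j acc => (((List.range n).filter (fun i => i ||| (i + 1) == j)).foldl
        (fun acc i => acc.set j (acc.getD j 0 - acc.getD i 0)) acc)) t := by
    apply foldr_congr_mem
    intro j hj acc
    rw [hw j (List.mem_range.mp hj)]
  rw [hAeq]
  obtain ⟨halen, ha⟩ := a_loop t n hn n 0 (by omega)
  obtain ⟨hblen, hb⟩ := alt_loop t n hn n 0 (by omega)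
  rw [← List.range_eq_range'] at halen ha hblen hb
  apply List.ext_getElem (by rw [halen, hblen])
  intro k h1 h2
  have hk : k < n := by rw [halen] at h1; exact h1
  have hab := (ha k hk).trans (((hb k hk).trans (by rw [if_pos (Nat.zero_le k)])).symm)
  rwa [List.getD_eq_getElem _ _ h1, List.getD_eq_getElem _ _ h2] at hab
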